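-- pv_equiv track=rewrite | github.com/vugtk21/RUIANToolbox | RUIANServices/services/addresswebservices.py | getAddressTabName
-- ===== SOURCE A (Python) =====
-- def getAddressTabName(itemName):
--     ADDRESSTABNAMES = {
--         "vstup" : ["FillAddressButton", "Locality", "LocalityPart", "DistrictNumber", "Street", "HouseNumber", "RecordNumber", "OrientationNumber", "OrientationNumberCharacter", "ZIPCode"],
--         "id" : ["AddressPlaceId"],
--         "adresa" : ["SearchText"]
--     }
--     for key in ADDRESSTABNAMES:
--         if itemName in ADDRESSTABNAMES[key]:
--             return key
--     return ""
-- ===== SOURCE B (Python) =====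
-- _TAB_OF_ITEM = {
--     "FillAddressButton": "vstup", "Locality": "vstup", "LocalityPart": "vstup",
--     "DistrictNumber": "vstup", "Street": "vstup", "HouseNumber": "vstup",
--     "RecordNumber": "vstup", "OrientationNumber": "vstup",
--     "OrientationNumberCharacter": "vstup", "ZIPCode": "vstup",
--     "AddressPlaceId": "id", "SearchText": "adresa",
-- }
--
-- def getAddressTabName(itemName):
--     return _TAB_OF_ITEM.get(itemName, "")
-- ===== Notes on version B (the rewrite author's own statement) =====
-- stated objective: simpler
-- what changed: Replaces the loop over category keys with inner list-membership scans by a single pre-built flat reverse dict mapping each item name to its category, returned via one .get lookup with the empty-string default.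
import Mathlib
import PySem

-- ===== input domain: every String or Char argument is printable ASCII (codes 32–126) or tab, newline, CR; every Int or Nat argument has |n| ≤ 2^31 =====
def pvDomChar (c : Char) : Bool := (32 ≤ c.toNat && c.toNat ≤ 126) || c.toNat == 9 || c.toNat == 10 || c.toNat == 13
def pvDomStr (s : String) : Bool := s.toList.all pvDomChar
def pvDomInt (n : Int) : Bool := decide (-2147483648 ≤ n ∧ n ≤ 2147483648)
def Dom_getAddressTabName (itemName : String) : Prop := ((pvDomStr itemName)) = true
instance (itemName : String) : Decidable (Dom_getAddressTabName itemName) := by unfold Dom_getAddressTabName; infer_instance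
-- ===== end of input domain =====

-- B replaces the key-loop with inner membership scans by one flat reverse-index lookup (simpler); same return values everywhere.


-- ===== PORT A =====
-- loop "for key in ADDRESSTABNAMES: if itemName in ADDRESSTABNAMES[key]: return key" as structural recursion
def pvALoop (itemName : String) : List (String × List String) → String
  | [] => ""
  | (key, items) :: rest => if itemName ∈ items then key else pvALoop itemName rest

def getAddressTabName (itemName : String) : String :=
  pvALoop itemName
    [("vstup", ["FillAddressButton", "Locality", "LocalityPart", "DistrictNumber", "Street", "HouseNumber", "RecordNumber", "OrientationNumber", "OrientationNumberCharacter", "ZIPCode"]),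
     ("id", ["AddressPlaceId"]),
     ("adresa", ["SearchText"])]


-- ===== PORT B =====
-- flat reverse dict item name -> category, one lookup with default ""
def pvTabOfItem : PySem.Dict String String :=
  PySem.Dict.mk
    [("FillAddressButton", "vstup"), ("Locality", "vstup"), ("LocalityPart", "vstup"),
     ("DistrictNumber", "vstup"), ("Street", "vstup"), ("HouseNumber", "vstup"),
     ("RecordNumber", "vstup"), ("OrientationNumber", "vstup"),
     ("OrientationNumberCharacter", "vstup"), ("ZIPCode", "vstup"),
     ("AddressPlaceId", "id"), ("SearchText", "adresa")]

def getAddressTabName_alt (itemName : String) : String :=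
  PySem.Dict.getD pvTabOfItem itemName ""


-- ===== PRECONDITION & SPEC =====
def Spec_getAddressTabName (itemName : String) (out : String) : Prop := out = getAddressTabName_alt itemName
instance (itemName : String) (out : String) : Decidable (Spec_getAddressTabName itemName out) := by unfold Spec_getAddressTabName; infer_instance

-- ===== CLAIM (what is proved, stated in full; the proofs are below) =====
def Claim_equal_getAddressTabName : Prop := ∀ (itemName : String), Dom_getAddressTabName itemName → Spec_getAddressTabName itemName (getAddressTabName itemName)

-- ===== LEMMAS AND PROOFS =====

-- ===== VERDICT (by name: the statement is the Claim_ definition above) =====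
theorem getAddressTabName_spec : Claim_equal_getAddressTabName := by
  intro s _
  unfold Spec_getAddressTabName
  by_cases h1 : s = "FillAddressButton"
  · subst h1; decide
  by_cases h2 : s = "Locality"
  · subst h2; decide
  by_cases h3 : s = "LocalityPart"
  · subst h3; decide
  by_cases h4 : s = "DistrictNumber"
  · subst h4; decide
  by_cases h5 : s = "Street"
  · subst h5; decide
  by_cases h6 : s = "HouseNumber"
  · subst h6; decide
  by_cases h7 : s = "RecordNumber"
  · subst h7; decide
  by_cases h8 : s = "OrientationNumber"
  · subst h8; decide
  by_cases h9 : s = "OrientationNumberCharacter"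
  · subst h9; decide
  by_cases h10 : s = "ZIPCode"
  · subst h10; decide
  by_cases h11 : s = "AddressPlaceId"
  · subst h11; decide
  by_cases h12 : s = "SearchText"
  · subst h12; decide
  have hA : getAddressTabName s = "" := by
    simp [getAddressTabName, pvALoop, List.mem_cons, h1, h2, h3, h4, h5, h6, h7, h8, h9, h10, h11, h12]
  have b1 : ("FillAddressButton" == s) = false := by simp [Ne.symm h1]
  have b2 : ("Locality" == s) = false := by simp [Ne.symm h2]
  have b3 : ("LocalityPart" == s) = false := by simp [Ne.symm h3]
  have b4 : ("DistrictNumber" == s) = false := by simp [Ne.symm h4]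
  have b5 : ("Street" == s) = false := by simp [Ne.symm h5]
  have b6 : ("HouseNumber" == s) = false := by simp [Ne.symm h6]
  have b7 : ("RecordNumber" == s) = false := by simp [Ne.symm h7]
  have b8 : ("OrientationNumber" == s) = false := by simp [Ne.symm h8]
  have b9 : ("OrientationNumberCharacter" == s) = false := by simp [Ne.symm h9]
  have b10 : ("ZIPCode" == s) = false := by simp [Ne.symm h10]
  have b11 : ("AddressPlaceId" == s) = false := by simp [Ne.symm h11]
  have b12 : ("SearchText" == s) = false := by simp [Ne.symm h12]
  have hB : getAddressTabName_alt s = "" := by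
    simp [getAddressTabName_alt, pvTabOfItem, PySem.Dict.getD, PySem.Dict.get?, List.find?, b1, b2, b3, b4, b5, b6, b7, b8, b9, b10, b11, b12]
  rw [hA, hB]
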